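-- pv_equiv track=rewrite | github.com/BySalim/Defie-Turing | problem67.py | _stern
-- ===== SOURCE A (Python) =====
-- def _stern(k_terme, _cache = {0: 0, 1: 1}):
--     """Calcule le k ième terme de la suite diatomique de stern avec la (Récursivité) et la mémorisation dans le cache"""
--
--     # Cas de base: le terme est 0 ou 1 alors on connais sa valeur
--     if k_terme in _cache:
--         return _cache[k_terme]
--
--     # On applique la formule en fonction de la parité de k et on cacul le terme n
--     if k_terme % 2 == 0:
--         n = k_terme // 2
--         _cache[k_terme] = _stern(n)
--     else:
--         n = (k_terme - 1) // 2
--         _cache[k_terme] = _stern(n) + _stern(n + 1)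
--
--     return _cache[k_terme]
-- ===== SOURCE B (Python) =====
-- def _stern(k_terme, _cache={0: 0, 1: 1}):
--     """Iterative fusc: walk the binary expansion of k_terme with the continuant pair (a, b)."""
--     a, b = 1, 0
--     n = k_terme
--     while n:
--         if n % 2:
--             b += a
--         else:
--             a += b
--         n = n // 2
--     return b
-- ===== Notes on version B (the rewrite author's own statement) =====
-- stated objective: idiomatic
-- what changed: Replaces the top-down memoized recursion (dict cache, two recursive calls on the odd branch) with a single bottom-up loop over the binary digits of k maintaining the continuant pair (a, b) of the Stern sequence.
import Mathlib
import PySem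

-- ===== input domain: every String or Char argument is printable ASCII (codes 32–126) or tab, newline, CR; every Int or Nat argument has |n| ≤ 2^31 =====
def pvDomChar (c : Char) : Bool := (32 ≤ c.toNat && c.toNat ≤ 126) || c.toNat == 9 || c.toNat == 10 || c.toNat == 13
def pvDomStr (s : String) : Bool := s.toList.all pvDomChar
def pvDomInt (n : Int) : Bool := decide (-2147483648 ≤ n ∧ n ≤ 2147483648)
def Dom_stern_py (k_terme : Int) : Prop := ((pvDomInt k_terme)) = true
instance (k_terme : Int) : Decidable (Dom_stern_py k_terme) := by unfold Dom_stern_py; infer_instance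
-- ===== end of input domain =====

-- B replaces A's top-down memoized recursion by a bottom-up loop over the binary
-- digits maintaining the continuant pair (a, b); same values, different decomposition.
-- (A mutates its default-argument cache across calls; the equivalence is about the return value.)


-- ===== PORT A =====
-- The value A computes (and caches): recursion on the value of k; base cases are the
-- cache's initial contents {0:0, 1:1}.  Negative k recurses forever in Python
-- (RecursionError) and is excluded by Pre_; recursion is carried on a Nat.
def sternA : Nat → Int
  | 0 => 0
  | 1 => 1
  | n+2 =>
    if (n+2) % 2 = 0 then
      sternA ((n+2) / 2)
    else
      sternA ((n+2 - 1) / 2) + sternA ((n+2 - 1) / 2 + 1)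
decreasing_by all_goals omega

def stern_py (k_terme : Int) : Int := sternA k_terme.toNat

-- ===== PORT B =====
-- while n: if n % 2: b += a else: a += b; n //= 2 — recursion on the Nat value of n.
def fuscGo : Nat → Int → Int → Int
  | 0, _, b => b
  | n+1, a, b =>
    if (n+1) % 2 = 1 then fuscGo ((n+1) / 2) a (b + a)
    else fuscGo ((n+1) / 2) (a + b) b
decreasing_by all_goals omega

def stern_py_alt (k_terme : Int) : Int := fuscGo k_terme.toNat 1 0

-- ===== PRECONDITION & SPEC =====
-- Pre_ excludes k_terme < 0, on which A's recursion never reaches a base case and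
-- raises RecursionError (B's loop likewise never terminates there, since n // 2 fixes -1).
def Pre_stern_py (k_terme : Int) : Prop := 0 ≤ k_terme
instance (k_terme : Int) : Decidable (Pre_stern_py k_terme) := by unfold Pre_stern_py; infer_instance
def pvWitness_stern_py : Int := (11)

def Spec_stern_py (k_terme : Int) (out : Int) : Prop := out = stern_py_alt k_terme
instance (k_terme : Int) (out : Int) : Decidable (Spec_stern_py k_terme out) := by unfold Spec_stern_py; infer_instance

-- ===== CLAIM (what is proved, stated in full; the proofs are below) =====
def Claim_equal_stern_py : Prop := ∀ (k_terme : Int), Dom_stern_py k_terme → Pre_stern_py k_terme → Spec_stern_py k_terme (stern_py k_terme)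

-- ===== LEMMAS AND PROOFS =====
theorem sternA_even (m : Nat) : sternA (2 * m) = sternA m := by
  match m with
  | 0 => rfl
  | m+1 =>
    have h : 2 * (m + 1) = 2 * m + 2 := by ring
    rw [h, sternA]
    have h2 : (2 * m + 2) % 2 = 0 := by omega
    have h3 : (2 * m + 2) / 2 = m + 1 := by omega
    simp [h2, h3]

theorem sternA_odd (m : Nat) : sternA (2 * m + 1) = sternA m + sternA (m + 1) := by
  match m with
  | 0 => simp [sternA]
  | m+1 =>
    have h : 2 * (m + 1) + 1 = (2 * m + 1) + 2 := by ring
    rw [h, sternA]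
    have h2 : ((2 * m + 1) + 2) % 2 = 1 := by omega
    have h3 : ((2 * m + 1) + 2 - 1) / 2 = m + 1 := by omega
    rw [if_neg (by omega), h3]

theorem fuscGo_eq (n : Nat) : ∀ a b : Int, fuscGo n a b = b * sternA (n + 1) + a * sternA n := by
  induction n using Nat.strong_induction_on with
  | _ n ih =>
    intro a b
    match n with
    | 0 => simp [fuscGo, sternA]
    | n+1 =>
      rw [fuscGo]
      rcases Nat.even_or_odd (n+1) with h | h
      · obtain ⟨m, hm⟩ := h
        have hm' : n + 1 = 2 * m := by omega
        have hmod : (n+1) % 2 = 0 := by omega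
        have hdiv : (n+1) / 2 = m := by omega
        have hlt : m < n + 1 := by omega
        rw [hmod, if_neg (by norm_num), hdiv]
        rw [ih m hlt, hm', sternA_even, sternA_odd]
        ring
      · obtain ⟨m, hm⟩ := h
        have hmod : (n+1) % 2 = 1 := by omega
        have hdiv : (n+1) / 2 = m := by omega
        have hlt : m < n + 1 := by omega
        rw [hmod, if_pos rfl, hdiv]
        rw [ih m hlt, hm, sternA_odd]
        have h2 : 2 * m + 1 + 1 = 2 * (m + 1) := by ring
        rw [h2, sternA_even]
        ring

-- ===== VERDICT (by name: the statement is the Claim_ definition above) =====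
theorem stern_py_spec : Claim_equal_stern_py := by
  intro k _ _
  unfold Spec_stern_py stern_py stern_py_alt
  rw [fuscGo_eq]
  simp
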